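-- pv_equiv track=rewrite | github.com/carden-code/VideoLingo | core/utils/span_utils.py | match_span_space
-- ===== SOURCE A (Python) =====
-- from typing import List, Tuple
--
-- def match_span_space(tokens: List[str], word_tokens: List[Tuple[int, str]], start_idx: int):
--     if not tokens:
--         return None
--     for i in range(start_idx, len(word_tokens) - len(tokens) + 1):
--         window = [t for _, t in word_tokens[i:i + len(tokens)]]
--         if window == tokens:
--             start_word_idx = word_tokens[i][0]
--             end_word_idx = word_tokens[i + len(tokens) - 1][0]
--             return start_word_idx, end_word_idx, i + len(tokens)
--     return None
-- ===== SOURCE B (Python) =====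
-- def match_span_space(tokens, word_tokens, start_idx):
--     if not tokens:
--         return None
--     m = len(tokens)
--     # KMP failure table: fail[q] = length of longest proper border of tokens[:q+1]
--     fail = [0] * m
--     k = 0
--     for q in range(1, m):
--         while k > 0 and tokens[q] != tokens[k]:
--             k = fail[k - 1]
--         if tokens[q] == tokens[k]:
--             k += 1
--         fail[q] = k
--     # KMP scan of the word stream from start_idx
--     j = 0
--     for i in range(start_idx, len(word_tokens)):
--         t = word_tokens[i][1]
--         while j > 0 and t != tokens[j]:
--             j = fail[j - 1]
--         if t == tokens[j]:
--             j += 1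
--         if j == m:
--             s = i - m + 1
--             return word_tokens[s][0], word_tokens[i][0], i + 1
--     return None
-- ===== Notes on version B (the rewrite author's own statement) =====
-- stated objective: alternative
-- what changed: B replaces A's slide-and-compare loop (a fresh window slice per position) with the Knuth-Morris-Pratt algorithm: it precomputes the pattern's failure table once and scans the word stream left to right without ever re-reading a word token (O(n+m) comparisons instead of O(n*m), though in CPython A's C-level slicing is not slower in wall time); Pre_ excludes negative start_idx, which lies outside the function's natural domain and where A's windows go through Python's negative-slice wraparound.
-- outside the precondition, e.g. on match_span_space(['a'], [(5, 'a')], -1): A returns (5, 5, 1), B returns (5, 5, 0)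
import Mathlib
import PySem

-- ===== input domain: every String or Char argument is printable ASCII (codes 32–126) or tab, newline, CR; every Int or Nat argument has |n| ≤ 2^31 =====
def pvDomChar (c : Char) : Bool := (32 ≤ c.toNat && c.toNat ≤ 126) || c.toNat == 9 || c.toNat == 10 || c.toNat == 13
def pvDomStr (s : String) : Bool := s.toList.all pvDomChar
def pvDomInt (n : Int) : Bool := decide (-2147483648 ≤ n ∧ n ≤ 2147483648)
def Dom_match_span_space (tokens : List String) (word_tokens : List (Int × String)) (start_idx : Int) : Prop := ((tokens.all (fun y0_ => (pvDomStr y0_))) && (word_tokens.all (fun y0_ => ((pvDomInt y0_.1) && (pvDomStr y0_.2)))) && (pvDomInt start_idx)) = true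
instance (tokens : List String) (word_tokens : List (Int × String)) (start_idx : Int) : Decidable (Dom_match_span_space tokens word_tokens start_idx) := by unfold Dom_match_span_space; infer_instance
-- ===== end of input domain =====

-- B replaces A's slide-and-compare loop (a fresh window slice per position) with the
-- Knuth–Morris–Pratt algorithm: a failure table for the token pattern plus a single
-- left-to-right scan of the word stream that never re-reads a word token (objective: alternative).

-- ===== PORT A =====
-- A's 'for i in range(...)' loop with early return, one call per loop iteration
def aGo (tokens : List String) (word_tokens : List (Int × String)) : List Int → Option (Int × Int × Int)
  | [] => none
  | i :: rest =>
    -- window = [t for _, t in word_tokens[i:i + len(tokens)]]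
    if (PySem.List.slice word_tokens (some i) (some (i + (tokens.length : Int)))).map Prod.snd = tokens then
      -- word_tokens[i][0], word_tokens[i + len(tokens) - 1][0]; a matching window is nonempty, so
      -- both indexings are in range and Python cannot raise here (the `none` arms are unreachable)
      match PySem.List.pyGet? word_tokens i, PySem.List.pyGet? word_tokens (i + (tokens.length : Int) - 1) with
      | some p, some q => some (p.1, q.1, i + (tokens.length : Int))
      | _, _ => none
    else aGo tokens word_tokens rest

def match_span_space (tokens : List String) (word_tokens : List (Int × String)) (start_idx : Int) : Option (Int × Int × Int) :=
  if tokens = [] then none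
  else aGo tokens word_tokens
    (PySem.List.pyRange start_idx ((word_tokens.length : Int) - (tokens.length : Int) + 1) 1)

-- ===== PORT B =====
-- Source B's 'while k > 0 and c != tokens[k]: k = fail[k-1]'. The fuel argument (called
-- with fuel = the initial k) only makes the recursion structural: k strictly decreases
-- at each step because every table entry satisfies fail[i] ≤ i, so fuel never runs out.
def kmpFall (p : List String) (fail : List Nat) (c : String) : Nat → Nat → Nat
  | 0, k => k
  | fuel + 1, k =>
    if 0 < k ∧ c ≠ p.getD k "" then kmpFall p fail c fuel (fail.getD (k - 1) 0) else k

-- Source B's 'for q in range(1, m): … fail[q] = k' (fail[q] is written in increasing q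
-- order and only entries below q are read, so writing is appending)
def kmpTableGo (p : List String) : List Nat → Nat → List Nat → List Nat
  | fail, _, [] => fail
  | fail, k, q :: qs =>
    let k1 := kmpFall p fail (p.getD q "") k k
    let k2 := if p.getD q "" = p.getD k1 "" then k1 + 1 else k1
    kmpTableGo p (fail ++ [k2]) k2 qs

def kmpTable (p : List String) : List Nat :=
  kmpTableGo p [0] 0 (List.range' 1 (p.length - 1))

-- Source B's 'for i in range(start_idx, len(word_tokens)): …' scan; e = word_tokens[i]
def kmpScan (p : List String) (fail : List Nat) (wt : List (Int × String)) :
    List (Int × String) → Nat → Nat → Option (Int × Int × Int)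
  | [], _, _ => none
  | e :: rest, i, j =>
    let j1 := kmpFall p fail e.2 j j
    let j2 := if e.2 = p.getD j1 "" then j1 + 1 else j1
    if j2 = p.length then
      some ((wt.getD (i + 1 - p.length) (0, "")).1, e.1, (i : Int) + 1)
    else kmpScan p fail wt rest (i + 1) j2

def match_span_space_alt (tokens : List String) (word_tokens : List (Int × String)) (start_idx : Int) : Option (Int × Int × Int) :=
  if tokens = [] then none
  else kmpScan tokens (kmpTable tokens) word_tokens
    (word_tokens.drop start_idx.toNat) start_idx.toNat 0

-- ===== PRECONDITION & SPEC =====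
-- Pre_ excludes negative start_idx: it lies outside the function's natural domain (a scan start
-- position), and A's behaviour there — windows taken through Python's negative-slice wraparound,
-- with a possibly negative resume index returned — is an accident of its implementation.
def Pre_match_span_space (tokens : List String) (word_tokens : List (Int × String)) (start_idx : Int) : Prop :=
  0 ≤ start_idx
instance (tokens : List String) (word_tokens : List (Int × String)) (start_idx : Int) : Decidable (Pre_match_span_space tokens word_tokens start_idx) := by unfold Pre_match_span_space; infer_instance

def pvWitness_match_span_space : List String × (List (Int × String)) × Int := (["a"], [(1, "a")], 0)

def Spec_match_span_space (tokens : List String) (word_tokens : List (Int × String)) (start_idx : Int) (out : Option (Int × Int × Int)) : Prop := out = match_span_space_alt tokens word_tokens start_idx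
instance (tokens : List String) (word_tokens : List (Int × String)) (start_idx : Int) (out : Option (Int × Int × Int)) : Decidable (Spec_match_span_space tokens word_tokens start_idx out) := by unfold Spec_match_span_space; infer_instance

-- ===== CLAIM (what is proved, stated in full; the proofs are below) =====
def Claim_equal_match_span_space : Prop := ∀ (tokens : List String) (word_tokens : List (Int × String)) (start_idx : Int), Dom_match_span_space tokens word_tokens start_idx → Pre_match_span_space tokens word_tokens start_idx → Spec_match_span_space tokens word_tokens start_idx (match_span_space tokens word_tokens start_idx)

-- ===== LEMMAS AND PROOFS =====

-- greatest l ≤ cap such that the length-l prefix of p is a suffix of u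
def mB (p u : List String) (cap : Nat) : Nat := Nat.findGreatest (fun l => p.take l <:+ u) cap

-- the failure-table value KMP needs at q: longest proper border of p.take q
def pb (p : List String) (q : Nat) : Nat := mB p (p.take q) (q - 1)

def TableOK (p : List String) (fail : List Nat) (k0 : Nat) : Prop :=
  ∀ i, i + 1 ≤ k0 → fail.getD i 0 = pb p (i + 1)

-- the word stream, the processed segment words[start..i), the window test, the result
def uSeg (wt : List (Int × String)) (start i : Nat) : List String :=
  ((wt.map Prod.snd).drop start).take (i - start)

def matchP (p : List String) (wt : List (Int × String)) (s : Nat) : Bool :=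
  decide (((wt.map Prod.snd).drop s).take p.length = p)

def outFn (p : List String) (wt : List (Int × String)) (s : Nat) : Option (Int × Int × Int) :=
  some ((wt.getD s (0, "")).1, (wt.getD (s + p.length - 1) (0, "")).1, (s : Int) + (p.length : Int))

-- A's window test and the value both programs return for a match, over Int positions
def winP (tokens : List String) (word_tokens : List (Int × String)) (i : Int) : Bool :=
  decide ((PySem.List.slice word_tokens (some i) (some (i + (tokens.length : Int)))).map Prod.snd = tokens)

def gOut (tokens : List String) (word_tokens : List (Int × String)) (i : Int) : Option (Int × Int × Int) :=
  match PySem.List.pyGet? word_tokens i, PySem.List.pyGet? word_tokens (i + (tokens.length : Int) - 1) with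
  | some p, some q => some (p.1, q.1, i + (tokens.length : Int))
  | _, _ => none

theorem aGo_eq_find (tokens : List String) (word_tokens : List (Int × String)) (L : List Int) :
    aGo tokens word_tokens L = (L.find? (winP tokens word_tokens)).bind (gOut tokens word_tokens) := by
  induction L with
  | nil => rfl
  | cons i rest ih =>
    simp only [aGo, List.find?]
    by_cases h : (PySem.List.slice word_tokens (some i) (some (i + (tokens.length : Int)))).map Prod.snd = tokens
    · simp [winP, h, gOut]
    · simp [winP, h, ih]

theorem suffix_snoc_iff {α : Type} (l1 l2 : List α) (a b : α) :
    ((l1 ++ [a]) <:+ (l2 ++ [b])) ↔ (a = b ∧ l1 <:+ l2) := by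
  rw [← List.reverse_prefix]
  simp [List.cons_prefix_cons]

theorem take_suffix_mB (p u : List String) (cap : Nat) : p.take (mB p u cap) <:+ u := by
  by_cases h : mB p u cap = 0
  · simp [h]
  · exact Nat.findGreatest_of_ne_zero rfl h

theorem mB_le (p u : List String) (cap : Nat) : mB p u cap ≤ cap := Nat.findGreatest_le cap

theorem pb_le (p : List String) (q : Nat) : pb p q ≤ q - 1 := Nat.findGreatest_le _

theorem take_suffix_pb (p : List String) (q : Nat) : p.take (pb p q) <:+ p.take q :=
  take_suffix_mB p (p.take q) (q - 1)

theorem le_pb (p : List String) (q l : Nat) (h1 : l ≤ q - 1) (h2 : p.take l <:+ p.take q) :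
    l ≤ pb p q := Nat.le_findGreatest h1 h2

theorem uSeg_length (wt : List (Int × String)) (start i : Nat) (h2 : i ≤ wt.length) :
    (uSeg wt start i).length = i - start := by
  unfold uSeg
  simp
  omega

-- extension: prefixes of p that are suffixes of u ++ [c]
theorem take_suffix_snoc_iff (p u : List String) (c : String) (l : Nat)
    (hl0 : 0 < l) (hlp : l ≤ p.length) :
    (p.take l <:+ u ++ [c]) ↔ (p.take (l - 1) <:+ u ∧ p.getD (l - 1) "" = c) := by
  have hk : l - 1 < p.length := by omega
  have ht : p.take l = p.take (l - 1) ++ [p[l - 1]] := by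
    have := List.take_succ_eq_append_getElem hk
    rwa [Nat.sub_add_cancel hl0] at this
  rw [ht, suffix_snoc_iff, List.getD_eq_getElem p "" hk]
  tauto

theorem kmpFall_spec (p : List String) (fail : List Nat) (u : List String) (c : String) :
    ∀ k0, TableOK p fail k0 → k0 ≤ p.length → p.take k0 <:+ u → ∀ fuel, k0 ≤ fuel →
      kmpFall p fail c fuel k0 ≤ k0 ∧
      p.take (kmpFall p fail c fuel k0) <:+ u ∧
      (kmpFall p fail c fuel k0 = 0 ∨ c = p.getD (kmpFall p fail c fuel k0) "") ∧
      (∀ l, l ≤ k0 → p.take l <:+ u → c = p.getD l "" → l ≤ kmpFall p fail c fuel k0) := by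
  intro k0
  induction k0 using Nat.strong_induction_on with
  | _ k0 ih =>
    intro hT hk0p hsfx fuel hfuel
    by_cases hcond : 0 < k0 ∧ c ≠ p.getD k0 ""
    · obtain ⟨hk0pos, hne⟩ := hcond
      cases fuel with
      | zero => omega
      | succ f =>
        rw [kmpFall, if_pos ⟨hk0pos, hne⟩]
        have hfe : fail.getD (k0 - 1) 0 = pb p k0 := by
          have := hT (k0 - 1) (by omega)
          rwa [Nat.sub_add_cancel hk0pos] at this
        rw [hfe]
        have hk1le : pb p k0 ≤ k0 - 1 := pb_le p k0
        have hk1u : p.take (pb p k0) <:+ u := (take_suffix_pb p k0).trans hsfx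
        have hT' : TableOK p fail (pb p k0) := fun i hi => hT i (by omega)
        obtain ⟨ha, hb, hc, hd⟩ := ih (pb p k0) (by omega) hT' (by omega) hk1u f (by omega)
        refine ⟨by omega, hb, hc, ?_⟩
        intro l hl hlu hlc
        rcases Nat.lt_or_ge l k0 with hlt | hge
        · have hlk0 : p.take l <:+ p.take k0 := by
            apply List.suffix_of_suffix_length_le hlu hsfx
            simp
            omega
          exact hd l (le_pb p k0 l (by omega) hlk0) hlu hlc
        · have hleq : l = k0 := by omega
          subst hleq
          exact absurd hlc hne
    · have hres : ∀ fl, kmpFall p fail c fl k0 = k0 := by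
        intro fl
        cases fl with
        | zero => rfl
        | succ f => rw [kmpFall, if_neg hcond]
      rw [hres]
      push Not at hcond
      refine ⟨le_rfl, hsfx, ?_, fun l hl _ _ => hl⟩
      by_cases h0 : k0 = 0
      · exact Or.inl h0
      · exact Or.inr (hcond (by omega))

theorem kmpStep (p : List String) (fail : List Nat) (u : List String) (c : String) (cap k0 : Nat)
    (hT : TableOK p fail k0) (hcap : cap < p.length) (hk0 : k0 ≤ cap)
    (hsfx : p.take k0 <:+ u)
    (hmax : ∀ l, l ≤ cap → p.take l <:+ u → l ≤ k0) :
    (if c = p.getD (kmpFall p fail c k0 k0) "" then kmpFall p fail c k0 k0 + 1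
     else kmpFall p fail c k0 k0) = mB p (u ++ [c]) (cap + 1) := by
  obtain ⟨hr1, hr2, hr3, hr4⟩ := kmpFall_spec p fail u c k0 hT (by omega) hsfx k0 le_rfl
  set r := kmpFall p fail c k0 k0 with hrdef
  have hgP : p.take (mB p (u ++ [c]) (cap + 1)) <:+ u ++ [c] := take_suffix_mB p (u ++ [c]) (cap + 1)
  have hgle : mB p (u ++ [c]) (cap + 1) ≤ cap + 1 := mB_le p (u ++ [c]) (cap + 1)
  set g := mB p (u ++ [c]) (cap + 1) with hgdef
  by_cases hc : c = p.getD r ""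
  · rw [if_pos hc]
    have hP : p.take (r + 1) <:+ u ++ [c] := by
      rw [take_suffix_snoc_iff p u c (r + 1) (by omega) (by omega)]
      simpa using ⟨hr2, hc.symm⟩
    apply Nat.le_antisymm
    · exact Nat.le_findGreatest (by omega) hP
    · by_cases hg0 : g = 0
      · omega
      · rw [take_suffix_snoc_iff p u c g (by omega) (by omega)] at hgP
        obtain ⟨hg1, hg2⟩ := hgP
        have := hr4 (g - 1) (hmax (g - 1) (by omega) hg1) hg1 hg2.symm
        omega
  · rw [if_neg hc]
    have hr0 : r = 0 := by
      rcases hr3 with h | h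
      · exact h
      · exact absurd h hc
    rw [hr0]
    by_contra hne
    have hg0 : 0 < g := Nat.pos_of_ne_zero fun h => hne h.symm
    rw [take_suffix_snoc_iff p u c g (by omega) (by omega)] at hgP
    obtain ⟨hg1, hg2⟩ := hgP
    have hle := hr4 (g - 1) (hmax (g - 1) (by omega) hg1) hg1 hg2.symm
    have hgm : g - 1 = 0 := by omega
    rw [hgm] at hg2
    rw [hr0] at hc
    exact hc hg2.symm

theorem tableGo_spec (p : List String) : ∀ cnt q fail k,
    fail.length = q → 1 ≤ q → q + cnt = p.length →
    (∀ i, i < q → fail.getD i 0 = pb p (i + 1)) →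
    k = pb p q →
    (∀ i, i < p.length → (kmpTableGo p fail k (List.range' q cnt)).getD i 0 = pb p (i + 1)) := by
  intro cnt
  induction cnt with
  | zero =>
    intro q fail k hlen hq1 hqcnt hinv hk i hi
    exact hinv i (by omega)
  | succ cnt ih =>
    intro q fail k hlen hq1 hqcnt hinv hk
    have hqlt : q < p.length := by omega
    have hT : TableOK p fail k := by
      intro i hi
      apply hinv
      have := pb_le p q
      omega
    have hstep := kmpStep p fail (p.take q) (p.getD q "") (q - 1) k hT (by omega)
      (by rw [hk]; exact pb_le p q)
      (by rw [hk]; exact take_suffix_pb p q)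
      (by intro l hl hlu; rw [hk]; exact le_pb p q l hl hlu)
    have hsnoc : p.take q ++ [p.getD q ""] = p.take (q + 1) := by
      rw [List.getD_eq_getElem p "" hqlt]
      exact (List.take_succ_eq_append_getElem hqlt).symm
    rw [hsnoc, show q - 1 + 1 = q by omega] at hstep
    have hstep' : (if p.getD q "" = p.getD (kmpFall p fail (p.getD q "") k k) "" then
        kmpFall p fail (p.getD q "") k k + 1 else kmpFall p fail (p.getD q "") k k) = pb p (q + 1) := by
      rw [hstep]
      unfold pb
      norm_num
    rw [List.range'_succ]
    simp only [kmpTableGo]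
    rw [hstep']
    apply ih (q + 1) (fail ++ [pb p (q + 1)]) (pb p (q + 1)) (by simp [hlen]) (by omega) (by omega) ?_ rfl
    intro i hi
    rcases Nat.lt_or_ge i q with h | h
    · have hgl : (fail ++ [pb p (q + 1)]).getD i 0 = fail.getD i 0 := by
        unfold List.getD
        rw [List.getElem?_append_left (by omega)]
      rw [hgl]
      exact hinv i h
    · have hiq : i = q := by omega
      subst hiq
      have : (fail ++ [pb p (i + 1)]).getD fail.length 0 = pb p (i + 1) := by
        unfold List.getD
        simp
      rw [hlen] at this
      exact this

theorem table_spec (p : List String) (hp : p ≠ []) :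
    ∀ i, i < p.length → (kmpTable p).getD i 0 = pb p (i + 1) := by
  have hm : 0 < p.length := List.length_pos_of_ne_nil hp
  unfold kmpTable
  apply tableGo_spec p (p.length - 1) 1 [0] 0 rfl le_rfl (by omega) ?_ rfl
  intro i hi
  have hi0 : i = 0 := by omega
  subst hi0
  rfl

-- a full-pattern window ending at position i+1 is exactly a full-pattern suffix of the scanned segment
theorem match_iff_suffix (p : List String) (wt : List (Int × String)) (start i s : Nat)
    (hs : start ≤ s) (hsm : s + p.length = i + 1) (hi : i < wt.length) :
    (p <:+ uSeg wt start (i + 1)) ↔ (((wt.map Prod.snd).drop s).take p.length = p) := by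
  rw [List.suffix_iff_eq_drop, uSeg_length wt start (i + 1) (by omega)]
  unfold uSeg
  rw [List.drop_take, List.drop_drop]
  rw [show i + 1 - start - p.length = s - start by omega]
  rw [show start + (s - start) = s by omega]
  rw [show i + 1 - start - (s - start) = p.length by omega]
  exact eq_comm

theorem find?_range'_first (P : Nat → Bool) (sstar : Nat) : ∀ n a,
    a ≤ sstar → sstar < a + n → P sstar = true →
    (∀ s, a ≤ s → s < sstar → P s = false) →
    (List.range' a n).find? P = some sstar := by
  intro n
  induction n with
  | zero => intro a h1 h2; omega
  | succ n ih =>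
    intro a h1 h2 hP hmin
    rw [List.range'_succ, List.find?]
    by_cases ha : a = sstar
    · subst ha; simp [hP]
    · rw [hmin a le_rfl (by omega)]
      exact ih (a + 1) (by omega) (by omega) hP (fun s h1 h2 => hmin s (by omega) h2)

theorem kmpScan_go (p : List String) (fail : List Nat) (wt : List (Int × String)) (start : Nat)
    (hp : p ≠ []) (hTab : ∀ i, i < p.length → fail.getD i 0 = pb p (i + 1)) :
    ∀ cnt i j, i + cnt = wt.length → start ≤ i →
      p.take j <:+ uSeg wt start i →
      (∀ l, l ≤ p.length → p.take l <:+ uSeg wt start i → l ≤ j) →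
      j < p.length →
      (∀ s, start ≤ s → s + p.length ≤ i → matchP p wt s = false) →
      kmpScan p fail wt (wt.drop i) i j
        = ((List.range' start (wt.length + 1 - p.length - start)).find? (matchP p wt)).bind (outFn p wt) := by
  have hm : 0 < p.length := List.length_pos_of_ne_nil hp
  intro cnt
  induction cnt with
  | zero =>
    intro i j hcnt hsi hsfx hmaxI hjlt hnoM
    have hie : i = wt.length := by omega
    subst hie
    rw [List.drop_length]
    have hfind : (List.range' start (wt.length + 1 - p.length - start)).find? (matchP p wt) = none := by
      rw [List.find?_eq_none]
      intro s hs
      rw [List.mem_range'_1] at hs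
      simp [hnoM s hs.1 (by omega)]
    rw [hfind]
    rfl
  | succ cnt ih =>
    intro i j hcnt hsi hsfx hmaxI hjlt hnoM
    have hiw : i < wt.length := by omega
    rw [List.drop_eq_getElem_cons hiw]
    simp only [kmpScan]
    have husucc : uSeg wt start (i + 1) = uSeg wt start i ++ [wt[i].2] := by
      unfold uSeg
      rw [show i + 1 - start = (i - start) + 1 by omega]
      have hidx : i - start < ((wt.map Prod.snd).drop start).length := by
        simp
        omega
      rw [List.take_succ_eq_append_getElem hidx]
      congr 2
      rw [List.getElem_drop]
      have : start + (i - start) = i := by omega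
      simp [this]
    have hT : TableOK p fail j := fun i' hi' => hTab i' (by omega)
    have hstep := kmpStep p fail (uSeg wt start i) (wt[i].2) (p.length - 1) j hT (by omega) (by omega)
      hsfx (fun l hl hlu => hmaxI l (by omega) hlu)
    rw [show p.length - 1 + 1 = p.length by omega, ← husucc] at hstep
    by_cases hfull : (if wt[i].2 = p.getD (kmpFall p fail (wt[i].2) j j) "" then
        kmpFall p fail (wt[i].2) j j + 1 else kmpFall p fail (wt[i].2) j j) = p.length
    · rw [if_pos hfull]
      rw [hfull] at hstep
      have hsuf : p <:+ uSeg wt start (i + 1) := by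
        have := take_suffix_mB p (uSeg wt start (i + 1)) p.length
        rwa [← hstep, List.take_length] at this
      have hlenu : p.length ≤ i + 1 - start := by
        have h1 := hsuf.length_le
        rwa [uSeg_length wt start (i + 1) (by omega)] at h1
      have hstars : start ≤ i + 1 - p.length := by omega
      have hmatch : matchP p wt (i + 1 - p.length) = true := by
        unfold matchP
        rw [decide_eq_true_eq]
        exact (match_iff_suffix p wt start i (i + 1 - p.length) hstars (by omega) hiw).mp hsuf
      have hfind : (List.range' start (wt.length + 1 - p.length - start)).find? (matchP p wt)
          = some (i + 1 - p.length) := by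
        apply find?_range'_first _ _ _ _ hstars (by omega) hmatch
        intro s hs1 hs2
        exact hnoM s hs1 (by omega)
      rw [hfind]
      unfold outFn
      rw [Option.bind_some]
      have hg1 : wt.getD (i + 1 - p.length + p.length - 1) (0, "") = wt[i] := by
        rw [show i + 1 - p.length + p.length - 1 = i by omega]
        exact List.getD_eq_getElem wt (0, "") hiw
      rw [hg1]
      have hg2 : ((i + 1 - p.length : Nat) : Int) + (p.length : Int) = (i : Int) + 1 := by omega
      rw [hg2]
    · rw [if_neg hfull]
      apply ih (i + 1) _ (by omega) (by omega) ?_ ?_ ?_ ?_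
      · rw [hstep]
        exact take_suffix_mB p (uSeg wt start (i + 1)) p.length
      · intro l hl hlu
        rw [hstep]
        exact Nat.le_findGreatest hl hlu
      · have h1 : mB p (uSeg wt start (i + 1)) p.length ≤ p.length :=
          mB_le p (uSeg wt start (i + 1)) p.length
        rw [hstep] at hfull
        omega
      · intro s hs1 hs2
        rcases Nat.lt_or_ge (s + p.length) (i + 1) with h | h
        · exact hnoM s hs1 (by omega)
        · have hsm : s + p.length = i + 1 := by omega
          by_contra hmt
          have hmt' : matchP p wt s = true := by
            simpa using hmt
          unfold matchP at hmt'
          rw [decide_eq_true_eq] at hmt'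
          have hsuf := (match_iff_suffix p wt start i s hs1 hsm hiw).mpr hmt'
          have hple : p.length ≤ mB p (uSeg wt start (i + 1)) p.length := by
            apply Nat.le_findGreatest le_rfl
            rwa [List.take_length]
          rw [hstep] at hfull
          have := mB_le p (uSeg wt start (i + 1)) p.length
          omega

theorem pyRange_toNat (s0 : Nat) (b : Int) :
    PySem.List.pyRange (s0 : Int) b 1 = (List.range' s0 (b - s0).toNat).map (fun s : Nat => (s : Int)) := by
  rw [PySem.List.pyRange_one, List.range'_eq_map_range, List.map_map]
  apply List.map_congr_left
  intro k _
  simp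

theorem find?_bind_congr {R : Type} (L : List Nat) (P Q : Nat → Bool) (f g : Nat → Option R)
    (hPQ : ∀ s ∈ L, P s = Q s) (hfg : ∀ s ∈ L, Q s = true → f s = g s) :
    (L.find? P).bind f = (L.find? Q).bind g := by
  induction L with
  | nil => rfl
  | cons x xs ih =>
    rw [List.find?, List.find?, hPQ x (by simp)]
    cases hq : Q x with
    | true => simp [hfg x (by simp) hq]
    | false => exact ih (fun s hs => hPQ s (by simp [hs])) (fun s hs h => hfg s (by simp [hs]) h)

-- A's Int-indexed window test equals the Nat-indexed one, and on a match so do the outputs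
theorem winP_eq_matchP (tokens : List String) (wt : List (Int × String)) (s : Nat) :
    winP tokens wt (s : Int) = matchP tokens wt s := by
  unfold winP matchP
  rw [show ((s : Int) + (tokens.length : Int)) = (((s + tokens.length : Nat)) : Int) by push_cast; ring]
  rw [PySem.List.slice_natCast]
  rw [show s + tokens.length - s = tokens.length by omega]
  rw [List.map_take, List.map_drop]

theorem gOut_eq_outFn (tokens : List String) (wt : List (Int × String)) (s : Nat)
    (hp : tokens ≠ []) (h : matchP tokens wt s = true) :
    gOut tokens wt (s : Int) = outFn tokens wt s := by
  unfold matchP at h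
  have hm : 0 < tokens.length := List.length_pos_of_ne_nil hp
  have heq : ((wt.map Prod.snd).drop s).take tokens.length = tokens := by
    exact of_decide_eq_true h
  have hlen : s + tokens.length ≤ wt.length := by
    have := congrArg List.length heq
    simp at this
    omega
  have h1 : s < wt.length := by omega
  have h2 : s + tokens.length - 1 < wt.length := by omega
  unfold gOut outFn
  rw [show ((s : Int) + (tokens.length : Int) - 1) = (((s + tokens.length - 1 : Nat)) : Int) by omega]
  rw [PySem.List.pyGet?_natCast, PySem.List.pyGet?_natCast]
  rw [List.getElem?_eq_getElem h1, List.getElem?_eq_getElem h2]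
  rw [List.getD_eq_getElem wt (0, "") h1, List.getD_eq_getElem wt (0, "") h2]

-- ===== VERDICT (by name: the statement is the Claim_ definition above) =====
theorem match_span_space_spec : Claim_equal_match_span_space := by
  intro tokens wt start_idx hdom hpre
  unfold Spec_match_span_space match_span_space match_span_space_alt
  by_cases ht : tokens = []
  · simp [ht]
  · rw [if_neg ht, if_neg ht]
    have hm : 0 < tokens.length := List.length_pos_of_ne_nil ht
    obtain ⟨s0, rfl⟩ : ∃ s0 : Nat, start_idx = (s0 : Int) :=
      ⟨start_idx.toNat, (Int.toNat_of_nonneg hpre).symm⟩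
    rw [Int.toNat_natCast]
    -- A's scan, rewritten as a first-match search over Nat positions
    rw [aGo_eq_find, pyRange_toNat, List.find?_map]
    have hob : ∀ (o : Option Nat),
        (o.map (fun s : Nat => (s : Int))).bind (gOut tokens wt)
          = o.bind (fun s => gOut tokens wt (s : Int)) := by
      intro o
      cases o <;> rfl
    rw [hob]
    rw [show (winP tokens wt ∘ fun s : Nat => (s : Int)) = fun s : Nat => winP tokens wt (s : Int) from rfl]
    have hcnt : (((wt.length : Int) - (tokens.length : Int) + 1) - (s0 : Int)).toNat
        = wt.length + 1 - tokens.length - s0 := by omega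
    rw [hcnt]
    rw [find?_bind_congr (List.range' s0 (wt.length + 1 - tokens.length - s0))
      (fun s : Nat => winP tokens wt (s : Int)) (matchP tokens wt)
      (fun s : Nat => gOut tokens wt (s : Int)) (outFn tokens wt)
      (fun s _ => winP_eq_matchP tokens wt s)
      (fun s _ h => gOut_eq_outFn tokens wt s ht h)]
    -- B's scan equals the same first-match search
    rcases Nat.lt_or_ge wt.length s0 with hs0 | hs0
    · have hdrop : wt.drop s0 = [] := List.drop_eq_nil_of_le (by omega)
      rw [hdrop]
      have hzero : wt.length + 1 - tokens.length - s0 = 0 := by omega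
      rw [hzero]
      rfl
    · symm
      apply kmpScan_go tokens (kmpTable tokens) wt s0 ht (table_spec tokens ht)
        (wt.length - s0) s0 0 (by omega) le_rfl ?_ ?_ hm ?_
      · simp [uSeg]
      · intro l hl hlu
        have h0 : uSeg wt s0 s0 = [] := by simp [uSeg]
        rw [h0] at hlu
        have hnil : tokens.take l = [] := List.suffix_nil.mp hlu
        have hlen : (tokens.take l).length = 0 := by rw [hnil]; rfl
        rw [List.length_take] at hlen
        omega
      · intro s h1 h2
        exact ((by omega : False)).elim
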